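-- pv_equiv track=rewrite | github.com/SS-Mehjabin/PISA | Python-Code/generate_network.py | balance_partitions
-- ===== SOURCE A (Python) =====
-- from collections import defaultdict, deque
-- from collections import defaultdict
--
-- def balance_partitions(partition, n_parts, nodes_per_part):
--     part_sizes = defaultdict(int)
--     balanced_partition = partition.copy()
--
--     # Ensure that no partition exceeds the balanced size
--     for node, p in partition.items():
--         if part_sizes[p] < nodes_per_part:
--             part_sizes[p] += 1
--         else:
--             # Move the node to a partition that needs more nodes
--             for new_p in range(n_parts):
--                 if part_sizes[new_p] < nodes_per_part:
--                     balanced_partition[node] = new_p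
--                     part_sizes[new_p] += 1
--                     break
--     return balanced_partition
-- ===== SOURCE B (Python) =====
-- def balance_partitions(partition, n_parts, nodes_per_part):
--     # One fold of a step function over the items, carrying (free-capacity map,
--     # result map, pointer): 'free' stores REMAINING capacity (missing key = full
--     # capacity nodes_per_part) and 'ptr' advances monotonically past exhausted
--     # partitions, so there is no per-node rescan of range(n_parts).
--     def step(state, item):
--         free, balanced, ptr = state
--         node, p = item
--         if free.get(p, nodes_per_part) > 0:
--             free[p] = free.get(p, nodes_per_part) - 1
--             return (free, balanced, ptr)
--         while ptr < n_parts and free.get(ptr, nodes_per_part) <= 0: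
--             ptr += 1
--         if ptr < n_parts:
--             free[ptr] = free.get(ptr, nodes_per_part) - 1
--             balanced[node] = ptr
--         return (free, balanced, ptr)
--
--     state = ({}, dict(partition), 0)
--     for item in partition.items():
--         state = step(state, item)
--     return state[1]
-- ===== Notes on version B (the rewrite author's own statement) =====
-- stated objective: alternative
-- what changed: Instead of A's used-size counters with an inner rescan of range(n_parts) for every overflowing node, B folds one step function over the items carrying a remaining-capacity map (decremented, defaulting to nodes_per_part) and a monotonically advancing pointer past exhausted partitions, so the inner scan disappears.
import Mathlib
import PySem

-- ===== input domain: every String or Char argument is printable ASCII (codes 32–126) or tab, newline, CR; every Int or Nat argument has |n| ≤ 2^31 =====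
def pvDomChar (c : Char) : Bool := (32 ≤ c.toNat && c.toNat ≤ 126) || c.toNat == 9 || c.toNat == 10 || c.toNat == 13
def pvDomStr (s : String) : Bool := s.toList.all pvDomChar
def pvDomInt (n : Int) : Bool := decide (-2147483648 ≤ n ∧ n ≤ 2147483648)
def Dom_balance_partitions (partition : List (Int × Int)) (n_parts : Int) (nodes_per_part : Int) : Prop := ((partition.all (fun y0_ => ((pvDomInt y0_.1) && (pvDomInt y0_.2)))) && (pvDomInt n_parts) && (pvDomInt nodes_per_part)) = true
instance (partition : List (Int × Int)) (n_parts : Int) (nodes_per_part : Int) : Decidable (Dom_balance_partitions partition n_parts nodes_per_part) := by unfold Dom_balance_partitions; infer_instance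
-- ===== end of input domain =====

-- B folds one step function over the items carrying a remaining-capacity map and a
-- monotone pointer past exhausted partitions, instead of A's used-size counters with
-- an inner rescan of range(n_parts) per overflowing node (objective: alternative).

-- ===== PORT A =====
-- inner 'for new_p in range(n_parts): if part_sizes[new_p] < nodes_per_part: … break'
def bpA_find (sizes : PySem.Dict Int Int) (cap : Int) : List Int → Option Int
  | [] => none
  | j :: rest => if sizes.getD j 0 < cap then some j else bpA_find sizes cap rest

def bpA_go (cap n : Int) : List (Int × Int) → PySem.Dict Int Int → PySem.Dict Int Int → PySem.Dict Int Int
  | [], _, bal => bal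
  | (node, p) :: rest, sizes, bal =>
      if sizes.getD p 0 < cap then
        bpA_go cap n rest (sizes.insert p (sizes.getD p 0 + 1)) bal
      else
        match bpA_find sizes cap (PySem.List.pyRange 0 n 1) with
        | some q => bpA_go cap n rest (sizes.insert q (sizes.getD q 0 + 1)) (bal.insert node q)
        | none => bpA_go cap n rest sizes bal

def balance_partitions (partition : List (Int × Int)) (n_parts : Int) (nodes_per_part : Int) : List (Int × Int) :=
  (bpA_go nodes_per_part n_parts (PySem.Dict.ofList partition).items PySem.Dict.empty (PySem.Dict.ofList partition)).items

-- ===== PORT B =====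
-- 'while ptr < n_parts and free.get(ptr, nodes_per_part) <= 0: ptr += 1'
def bpB_skipFull (free : PySem.Dict Int Int) (cap n ptr : Int) : Int :=
  if h : ptr < n ∧ free.getD ptr cap ≤ 0 then bpB_skipFull free cap n (ptr + 1) else ptr
termination_by (n - ptr).toNat
decreasing_by omega

-- the 'step' closure: state = ((free-capacity map, result map), pointer)
def bpB_step (cap n : Int) (st : (PySem.Dict Int Int × PySem.Dict Int Int) × Int) (item : Int × Int) :
    (PySem.Dict Int Int × PySem.Dict Int Int) × Int :=
  if 0 < st.1.1.getD item.2 cap then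
    ((st.1.1.insert item.2 (st.1.1.getD item.2 cap - 1), st.1.2), st.2)
  else
    let q := bpB_skipFull st.1.1 cap n st.2
    if q < n then
      ((st.1.1.insert q (st.1.1.getD q cap - 1), st.1.2.insert item.1 q), q)
    else
      (st.1, q)

def balance_partitions_alt (partition : List (Int × Int)) (n_parts : Int) (nodes_per_part : Int) : List (Int × Int) :=
  (((PySem.Dict.ofList partition).items.foldl (bpB_step nodes_per_part n_parts)
      ((PySem.Dict.empty, PySem.Dict.ofList partition), 0)).1.2).items

-- ===== PRECONDITION & SPEC =====
def Spec_balance_partitions (partition : List (Int × Int)) (n_parts : Int) (nodes_per_part : Int) (out : List (Int × Int)) : Prop := out = balance_partitions_alt partition n_parts nodes_per_part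
instance (partition : List (Int × Int)) (n_parts : Int) (nodes_per_part : Int) (out : List (Int × Int)) : Decidable (Spec_balance_partitions partition n_parts nodes_per_part out) := by unfold Spec_balance_partitions; infer_instance

-- ===== CLAIM (what is proved, stated in full; the proofs are below) =====
def Claim_equal_balance_partitions : Prop := ∀ (partition : List (Int × Int)) (n_parts : Int) (nodes_per_part : Int), Dom_balance_partitions partition n_parts nodes_per_part → Spec_balance_partitions partition n_parts nodes_per_part (balance_partitions partition n_parts nodes_per_part)

-- ===== LEMMAS AND PROOFS =====

theorem bpB_skipFull_ge (free : PySem.Dict Int Int) (cap n ptr : Int) :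
    ptr ≤ bpB_skipFull free cap n ptr := by
  unfold bpB_skipFull
  split
  · have := bpB_skipFull_ge free cap n (ptr + 1); omega
  · omega
termination_by (n - ptr).toNat
decreasing_by omega

theorem bpB_skipFull_le (free : PySem.Dict Int Int) (cap n ptr : Int) (h : ptr ≤ max n 0) :
    bpB_skipFull free cap n ptr ≤ max n 0 := by
  unfold bpB_skipFull
  split
  · exact bpB_skipFull_le free cap n (ptr + 1) (by omega)
  · exact h
termination_by (n - ptr).toNat
decreasing_by omega

theorem bpB_skipFull_full (free : PySem.Dict Int Int) (cap n ptr : Int) :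
    ∀ j, ptr ≤ j → j < bpB_skipFull free cap n ptr → free.getD j cap ≤ 0 := by
  intro j hj hj'
  rw [bpB_skipFull] at hj'
  split at hj'
  · rename_i h
    rcases eq_or_lt_of_le hj with rfl | hlt
    · exact h.2
    · exact bpB_skipFull_full free cap n (ptr + 1) j (by omega) hj'
  · omega
termination_by (n - ptr).toNat
decreasing_by omega

theorem bpB_skipFull_notfull (free : PySem.Dict Int Int) (cap n ptr : Int) :
    bpB_skipFull free cap n ptr < n → 0 < free.getD (bpB_skipFull free cap n ptr) cap := by
  rw [bpB_skipFull]
  split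
  · exact bpB_skipFull_notfull free cap n (ptr + 1)
  · rename_i hc
    intro h
    by_contra hx
    exact hc ⟨h, by omega⟩
termination_by (n - ptr).toNat
decreasing_by omega

theorem bpA_find_none (sizes : PySem.Dict Int Int) (cap : Int) (l : List Int)
    (h : ∀ j ∈ l, cap ≤ sizes.getD j 0) : bpA_find sizes cap l = none := by
  induction l with
  | nil => rfl
  | cons j rest ih =>
      simp only [bpA_find]
      rw [if_neg (by have := h j (by simp); omega)]
      exact ih (fun k hk => h k (by simp [hk]))

theorem bpA_find_append_none (sizes : PySem.Dict Int Int) (cap : Int) (l1 l2 : List Int)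
    (h : bpA_find sizes cap l1 = none) :
    bpA_find sizes cap (l1 ++ l2) = bpA_find sizes cap l2 := by
  induction l1 with
  | nil => rfl
  | cons j rest ih =>
      simp only [bpA_find] at h ⊢
      split at h
      · exact absurd h (by simp)
      · rename_i hc; rw [List.cons_append]
        simp only [bpA_find]
        rw [if_neg hc]
        exact ih h

-- scanning [ptr, n) for the first non-full partition = skipping the exhausted ones,
-- given that 'free' stores the remaining capacities (free j = cap - sizes j)
theorem find_eq_skip_from (sizes free : PySem.Dict Int Int) (cap n ptr : Int)
    (hrel : ∀ j, free.getD j cap = cap - sizes.getD j 0) (h : ptr ≤ n) :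
    bpA_find sizes cap (PySem.List.pyRange ptr n 1) =
      (if bpB_skipFull free cap n ptr < n then some (bpB_skipFull free cap n ptr) else none) := by
  rcases eq_or_lt_of_le h with rfl | hlt
  · rw [PySem.List.pyRange_one_eq_nil (le_refl ptr), bpB_skipFull]
    rw [dif_neg (by omega)]
    simp [bpA_find]
  · rw [PySem.List.pyRange_one_cons hlt]
    simp only [bpA_find]
    by_cases hfull : sizes.getD ptr 0 < cap
    · rw [if_pos hfull]
      rw [bpB_skipFull, dif_neg (by have := hrel ptr; omega), if_pos hlt]
    · rw [if_neg hfull]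
      rw [show bpB_skipFull free cap n ptr = bpB_skipFull free cap n (ptr + 1) by
        rw [bpB_skipFull, dif_pos ⟨hlt, by have := hrel ptr; omega⟩]]
      exact find_eq_skip_from sizes free cap n (ptr + 1) hrel (by omega)
termination_by (n - ptr).toNat
decreasing_by omega

-- if everything below ptr is full, A's scan from 0 equals B's skip from ptr
theorem find_eq_skip (sizes free : PySem.Dict Int Int) (cap n ptr : Int)
    (hrel : ∀ j, free.getD j cap = cap - sizes.getD j 0)
    (h0 : 0 ≤ ptr) (hle : ptr ≤ max n 0)
    (hfull : ∀ j, 0 ≤ j → j < ptr → cap ≤ sizes.getD j 0) :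
    bpA_find sizes cap (PySem.List.pyRange 0 n 1) =
      (if bpB_skipFull free cap n ptr < n then some (bpB_skipFull free cap n ptr) else none) := by
  by_cases hn : ptr ≤ n
  · rw [PySem.List.pyRange_one_append 0 ptr n h0 hn]
    rw [bpA_find_append_none sizes cap _ _
      (bpA_find_none sizes cap _ (by
        intro j hj
        rw [PySem.List.mem_pyRange_one] at hj
        exact hfull j hj.1 hj.2))]
    exact find_eq_skip_from sizes free cap n ptr hrel hn
  · have hptr0 : ptr = 0 := by omega
    have hnneg : n < 0 := by omega
    subst hptr0
    rw [PySem.List.pyRange_one_eq_nil (by omega)]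
    rw [bpB_skipFull, dif_neg (by omega), if_neg (by omega)]
    rfl

theorem bpgo_eq (cap n : Int) (l : List (Int × Int)) :
    ∀ (sizes free bal : PySem.Dict Int Int) (ptr : Int),
      (∀ j, free.getD j cap = cap - sizes.getD j 0) →
      0 ≤ ptr → ptr ≤ max n 0 →
      (∀ j, 0 ≤ j → j < ptr → cap ≤ sizes.getD j 0) →
      bpA_go cap n l sizes bal = (l.foldl (bpB_step cap n) ((free, bal), ptr)).1.2 := by
  induction l with
  | nil => intro sizes free bal ptr _ _ _ _; rfl
  | cons hd rest ih =>
      intro sizes free bal ptr hrel h0 hle hfull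
      obtain ⟨node, p⟩ := hd
      rw [List.foldl_cons]
      simp only [bpA_go, bpB_step]
      by_cases hp : sizes.getD p 0 < cap
      · rw [if_pos hp, if_pos (show 0 < free.getD p cap by have := hrel p; omega)]
        apply ih _ _ _ ptr _ h0 hle
        · intro j hj hj'
          rw [PySem.Dict.getD_insert]
          split
          · rename_i hjp; subst hjp
            exact absurd hp (by have := hfull j hj hj'; omega)
          · exact hfull j hj hj'
        · intro j
          rw [PySem.Dict.getD_insert, PySem.Dict.getD_insert]
          split
          · have := hrel p; omega
          · exact hrel j
      · rw [if_neg hp, if_neg (show ¬ 0 < free.getD p cap by have := hrel p; omega)]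
        rw [find_eq_skip sizes free cap n ptr hrel h0 hle hfull]
        set q := bpB_skipFull free cap n ptr with hq
        by_cases hqn : q < n
        · simp only [if_pos hqn]
          have hqnf := bpB_skipFull_notfull free cap n ptr hqn
          rw [← hq] at hqnf
          have hqs : sizes.getD q 0 < cap := by have := hrel q; omega
          apply ih _ _ _ q _ (le_trans h0 (bpB_skipFull_ge free cap n ptr))
            (bpB_skipFull_le free cap n ptr hle)
          · intro j hj hj'
            rw [PySem.Dict.getD_insert]
            split
            · rename_i hjq; subst hjq; omega
            · by_cases hjp : j < ptr
              · exact hfull j hj hjp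
              · have := bpB_skipFull_full free cap n ptr j (by omega) hj'
                have := hrel j; omega
          · intro j
            rw [PySem.Dict.getD_insert, PySem.Dict.getD_insert]
            split
            · have := hrel q; omega
            · exact hrel j
        · simp only [if_neg hqn]
          apply ih _ _ _ q hrel (le_trans h0 (bpB_skipFull_ge free cap n ptr))
            (bpB_skipFull_le free cap n ptr hle)
          intro j hj hj'
          by_cases hjp : j < ptr
          · exact hfull j hj hjp
          · have := bpB_skipFull_full free cap n ptr j (by omega) hj'
            have := hrel j; omega

-- ===== VERDICT (by name: the statement is the Claim_ definition above) =====
theorem balance_partitions_spec : Claim_equal_balance_partitions := by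
  intro partition n_parts nodes_per_part _
  unfold Spec_balance_partitions balance_partitions balance_partitions_alt
  rw [bpgo_eq nodes_per_part n_parts ((PySem.Dict.ofList partition).items)
    PySem.Dict.empty PySem.Dict.empty (PySem.Dict.ofList partition) 0
    (by intro j; simp [PySem.Dict.getD_empty]) (le_refl 0) (by omega) (by omega)]
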